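-- pv_equiv track=rewrite | github.com/MikolajLH/ulam-spiral | main.py | spiral_walk
-- ===== SOURCE A (Python) =====
-- from typing import Iterator
--
-- def spiral_walk(n: int) -> Iterator[tuple[int,bool]]:
--     '''
--     16 - 15 - 14 - 13
--
--     05 - 04 - 03 | 12
--
--     06 | 01 - 02 | 11
--
--     07 - 08 - 09 - 10
--
--     yields and integer and whether imaginary arrow should be rotated by 90 degrees indicating a corner of the spiral.
--
--     In this example walk starts in 01 and the arrow point to the right (EAST),
--
--     the next step is to go forward to 02, but then in order to walk on the spiral the arrow has to be rotated counter-clockwise (NORTH).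
--
--     So the generated sequace will look like that:
--
--     (1, False) -> (2, True) -> (3, True) -> (4, False) -> (5, True)
--
--     starts on 1
--
--     go forward
--
--     when on 2 turn, then go forward
--
--     when on 3 turn, then go forward
--
--     when on 4 go forward
--
--     when on 5 turn, then go forward
--     '''
--     assert isinstance(n, int)
--     assert n >= 0
--     i = 0
--     if i == 0:
--         yield i + 1, False
--         i += 1
--     if i == 1:
--         yield i + 1, True
--         i += 1
--     s, t = 1, 0
--     for i in range(2, n):
--         if t % (2 * s) == 0:
--             s += 1
--             t = 0
--         yield i + 1, (t % s) == 0
--         t += 1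
-- ===== SOURCE B (Python) =====
-- def spiral_walk(n):
--     '''Explicit ring/arm traversal of the Ulam spiral walk.
--
--     Yields the same (value, corner-flag) pairs as the original, except that the
--     two head yields are guarded, so n=0 yields nothing and n=1 yields one step.
--     '''
--     assert isinstance(n, int)
--     assert n >= 0
--     if n >= 1:
--         yield 1, False
--     if n >= 2:
--         yield 2, True
--     value, s = 2, 2
--     while value < n:
--         for j in range(2 * s):
--             value += 1
--             if value > n:
--                 return
--             yield value, (j % s) == 0
--         s += 1
-- ===== Notes on version B (the rewrite author's own statement) =====
-- stated objective: alternative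
-- what changed: Replaces the single flat loop with modular counter state (s, t) and a reset condition by an explicit nested ring/arm traversal (outer while over rings, inner for over the 2*s arm positions with an early return), and guards the two head yields by n>=1 / n>=2.
-- intended difference: For n=0 and n=1 A unconditionally yields the head steps and returns [(1,False),(2,True)], while B yields only the first n steps ([] resp. [(1,False)]), which is the intended 'first n steps of the walk' behaviour that A exhibits for every n>=2. — e.g. on spiral_walk(0): A returns [(1, false), (2, true)], B returns []
import Mathlib
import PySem

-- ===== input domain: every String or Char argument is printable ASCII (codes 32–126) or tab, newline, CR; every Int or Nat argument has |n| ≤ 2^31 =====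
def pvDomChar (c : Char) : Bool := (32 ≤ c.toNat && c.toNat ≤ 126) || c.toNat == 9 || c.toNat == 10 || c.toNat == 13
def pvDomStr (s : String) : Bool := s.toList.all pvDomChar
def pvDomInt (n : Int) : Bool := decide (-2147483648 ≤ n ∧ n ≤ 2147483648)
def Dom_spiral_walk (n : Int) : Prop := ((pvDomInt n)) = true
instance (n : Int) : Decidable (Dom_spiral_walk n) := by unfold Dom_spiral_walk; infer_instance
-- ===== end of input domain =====

-- B replaces A's flat loop with modular counter state by an explicit nested ring/arm
-- traversal with guarded head yields (alternative decomposition; same cost); for n < 2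
-- B yields only the first n steps where A always yields two (stated as D_).


-- ===== PORT A =====
-- the 'for i in range(2, n)' loop with state (s, t); each yield conses in order
def spiralLoopA : List Int → Int → Int → List (Int × Bool)
  | [], _, _ => []
  | i :: rest, s, t =>
    let st := if PySem.Int.mod t (2 * s) == 0 then (s + 1, (0 : Int)) else (s, t)
    (i + 1, PySem.Int.mod st.2 st.1 == 0) :: spiralLoopA rest st.1 (st.2 + 1)

def spiral_walk (n : Int) : List (Int × Bool) :=
  if 0 ≤ n then   -- 'assert n >= 0' raises otherwise (outside Pre_)
    [((1 : Int), false), ((2 : Int), true)] ++ spiralLoopA (PySem.List.pyRange 2 n 1) 1 0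
  else []

-- ===== PORT B =====
-- the inner 'for j in range(2*s)' arm: yields collected; snd = some v (arm finished,
-- value now v) or none ('return' taken, generator stops)
def spiralArm (n s : Int) : List Int → Int → List (Int × Bool) × Option Int
  | [], v => ([], some v)
  | j :: rest, v =>
    if n < v + 1 then ([], none)
    else
      let r := spiralArm n s rest (v + 1)
      ((v + 1, PySem.Int.mod j s == 0) :: r.1, r.2)

-- the outer 'while value < n' loop over rings; fuel only makes the recursion
-- structural (n.toNat is always enough fuel: each ring advances value)
def spiralRings (n : Int) : Nat → Int → Int → List (Int × Bool)
  | 0, _, _ => []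
  | fuel + 1, s, v =>
    if v < n then
      match spiralArm n s (PySem.List.pyRange 0 (2 * s) 1) v with
      | (acc, some v') => acc ++ spiralRings n fuel (s + 1) v'
      | (acc, none) => acc
    else []

def spiral_walk_alt (n : Int) : List (Int × Bool) :=
  if 0 ≤ n then
    ((if 1 ≤ n then [((1 : Int), false)] else []) ++
     (if 2 ≤ n then [((2 : Int), true)] else [])) ++
    spiralRings n n.toNat 2 2
  else []

-- ===== PRECONDITION & SPEC =====
-- A's 'assert n >= 0' raises AssertionError on negative n
def Pre_spiral_walk (n : Int) : Prop := 0 ≤ n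
instance (n : Int) : Decidable (Pre_spiral_walk n) := by unfold Pre_spiral_walk; infer_instance
def pvWitness_spiral_walk : Int := 7

-- For n=0 and n=1 A unconditionally yields the head steps and returns
-- [(1,False),(2,True)], while B yields only the first n steps ([] resp. [(1,False)]),
-- the intended 'first n steps of the walk' behaviour A exhibits for every n>=2.
def D_spiral_walk (n : Int) : Prop := 0 ≤ n ∧ n < 2
instance (n : Int) : Decidable (D_spiral_walk n) := by unfold D_spiral_walk; infer_instance

def Spec_spiral_walk (n : Int) (out : List (Int × Bool)) : Prop := ¬ D_spiral_walk n → out = spiral_walk_alt n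
instance (n : Int) (out : List (Int × Bool)) : Decidable (Spec_spiral_walk n out) := by unfold Spec_spiral_walk; infer_instance

def pvDiffWitness_spiral_walk : Int := 0
def pvDiffWitnessOut_spiral_walk : (List (Int × Bool)) × (List (Int × Bool)) :=
  ([(1, false), (2, true)], [])

-- ===== CLAIM (what is proved, stated in full; the proofs are below) =====
def Claim_unchanged_spiral_walk : Prop := ∀ (n : Int), Dom_spiral_walk n → Pre_spiral_walk n → Spec_spiral_walk n (spiral_walk n)
def Claim_changed_spiral_walk : Prop := Dom_spiral_walk (pvDiffWitness_spiral_walk) ∧ Pre_spiral_walk (pvDiffWitness_spiral_walk) ∧ D_spiral_walk (pvDiffWitness_spiral_walk) ∧ spiral_walk (pvDiffWitness_spiral_walk) = pvDiffWitnessOut_spiral_walk.1 ∧ spiral_walk_alt (pvDiffWitness_spiral_walk) = pvDiffWitnessOut_spiral_walk.2 ∧ pvDiffWitnessOut_spiral_walk.1 ≠ pvDiffWitnessOut_spiral_walk.2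
def Claim_exact_spiral_walk : Prop := ∀ (n : Int), Dom_spiral_walk n → Pre_spiral_walk n → D_spiral_walk n → spiral_walk n ≠ spiral_walk_alt n

-- ===== LEMMAS AND PROOFS =====

-- B's outer loop does nothing once value ≥ n
theorem spiralRings_stop (n : Int) (fuel : Nat) (s v : Int) (h : ¬ v < n) :
    spiralRings n fuel s v = [] := by
  cases fuel <;> simp [spiralRings, h]

-- the reset test with positive modulus: self mod is 0, a value in (0, d) is kept
theorem mod_self_eq_zero (d : Int) (hd : 0 < d) : (PySem.Int.mod d d == 0) = true := by
  rw [PySem.Int.mod_eq_emod_of_pos hd]; simp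

theorem mod_of_lt_ne_zero (d t : Int) (h1 : 1 ≤ t) (h2 : t < d) :
    (PySem.Int.mod t d == 0) = false := by
  rw [PySem.Int.mod_eq_emod_of_pos (by omega), Int.emod_eq_of_lt (by omega) h2]
  simp; omega

theorem mod_zero_eq_zero (d : Int) (hd : 0 < d) : (PySem.Int.mod 0 d == 0) = true := by
  rw [PySem.Int.mod_eq_emod_of_pos hd]; simp

-- main invariant: A's loop from state (s, t) equals B's arm from position t of
-- ring s at the same value i, followed by the remaining rings
theorem loop_eq_rings (m : Nat) : ∀ (n i s t : Int), 2 ≤ s → 1 ≤ t → t ≤ 2 * s →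
    (n - i).toNat = m → ∀ fuel : Nat, (n - i).toNat ≤ fuel →
    spiralLoopA (PySem.List.pyRange i n 1) s t =
      (spiralArm n s (PySem.List.pyRange t (2 * s) 1) i).1 ++
      (match (spiralArm n s (PySem.List.pyRange t (2 * s) 1) i).2 with
       | some v => spiralRings n fuel (s + 1) v
       | none => []) := by
  induction m with
  | zero =>
    intro n i s t hs ht1 ht2 hm fuel _
    have hin : n ≤ i := by omega
    rw [PySem.List.pyRange_one_eq_nil hin]
    rcases eq_or_lt_of_le ht2 with h | h
    · subst h
      rw [PySem.List.pyRange_one_eq_nil (le_refl _)]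
      simp only [spiralLoopA, spiralArm]
      exact (spiralRings_stop n fuel (s + 1) i (by omega)).symm
    · rw [PySem.List.pyRange_one_cons h]
      simp [spiralLoopA, spiralArm, show n < i + 1 by omega]
  | succ m ih =>
    intro n i s t hs ht1 ht2 hm fuel hfuel
    have hin : i < n := by omega
    rw [PySem.List.pyRange_one_cons hin]
    rcases eq_or_lt_of_le ht2 with h | h
    · -- t = 2s: A resets to ring s+1, t := 0; B's arm is exhausted and the next ring starts
      subst h
      rw [PySem.List.pyRange_one_eq_nil (le_refl _)]
      obtain ⟨f, rfl⟩ : ∃ f, fuel = f + 1 := ⟨fuel - 1, by omega⟩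
      have harm := ih n (i + 1) (s + 1) 1 (by omega) (le_refl _) (by omega) (by omega) f (by omega)
      have h3 : ¬ n < i + 1 := by omega
      simp only [spiralArm, List.nil_append]
      rw [spiralRings, if_pos hin, PySem.List.pyRange_one_cons (show (0:Int) < 2 * (s + 1) by omega)]
      simp [spiralLoopA, spiralArm, mod_self_eq_zero (2 * s) (by omega),
        mod_zero_eq_zero (s + 1) (by omega), h3, harm]
      cases hr : (spiralArm n (s + 1) (PySem.List.pyRange 1 (2 * (s + 1)) 1) (i + 1)).2 <;> simp_all
    · -- t < 2s: both sides take one ordinary arm step with flag (t % s == 0)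
      rw [PySem.List.pyRange_one_cons h]
      have harm := ih n (i + 1) s (t + 1) hs (by omega) (by omega) (by omega) fuel (by omega)
      simp only [spiralLoopA, mod_of_lt_ne_zero (2 * s) t ht1 h, Bool.false_eq_true, if_false,
        spiralArm, if_neg (show ¬ n < i + 1 by omega)]
      rw [harm]
      cases hr : (spiralArm n s (PySem.List.pyRange (t + 1) (2 * s) 1) (i + 1)).2 <;> simp_all

theorem spiral_walk_eq (n : Int) (hn : 2 ≤ n) : spiral_walk n = spiral_walk_alt n := by
  unfold spiral_walk spiral_walk_alt
  rw [if_pos (by omega : (0:Int) ≤ n), if_pos (by omega : (0:Int) ≤ n),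
    if_pos (by omega : (1:Int) ≤ n), if_pos hn]
  rcases eq_or_lt_of_le hn with h | h
  · subst h
    rw [PySem.List.pyRange_one_eq_nil (le_refl _), spiralRings_stop 2 _ 2 2 (by omega)]
    rfl
  · -- n ≥ 3: peel the first loop step (the s=1 → s=2 reset) on both sides
    congr 1
    rw [PySem.List.pyRange_one_cons (show (2:Int) < n by omega)]
    simp only [spiralLoopA]
    norm_num [PySem.Int.mod]
    obtain ⟨f, hf⟩ : ∃ f, n.toNat = f + 1 := ⟨n.toNat - 1, by omega⟩
    rw [hf, spiralRings, if_pos (by omega : (2:Int) < n)]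
    rw [show (2:Int) * 2 = 4 by norm_num,
      PySem.List.pyRange_one_cons (show (0:Int) < 4 by norm_num)]
    simp only [spiralArm, if_neg (show ¬ n < 2 + 1 by omega)]
    have hmod : PySem.Int.mod (0:Int) 2 = 0 := by decide
    have hmain := loop_eq_rings (n - 3).toNat n 3 2 1 (le_refl _) (le_refl _) (by omega) rfl f (by omega)
    rw [show (2:Int) * 2 = 4 by norm_num] at hmain
    rw [hmain]
    cases hr : (spiralArm n 2 (PySem.List.pyRange 1 4 1) 3).2 <;> simp_all

-- ===== VERDICT (by name: the statement is the Claim_ definition above) =====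
theorem spiral_walk_spec : Claim_unchanged_spiral_walk := by
  intro n _ hpre hnd
  refine spiral_walk_eq n ?_
  simp only [Pre_spiral_walk] at hpre
  simp only [D_spiral_walk, not_and, not_lt] at hnd
  omega

theorem spiral_walk_changed : Claim_changed_spiral_walk := by
  unfold Claim_changed_spiral_walk; decide

theorem spiral_walk_tight : Claim_exact_spiral_walk := by
  intro n _ _ hd
  unfold D_spiral_walk at hd
  have : n = 0 ∨ n = 1 := by omega
  rcases this with rfl | rfl <;> decide
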